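-- pv_equiv track=rewrite | github.com/kim-min-ju449/Cos-pro | practice1.py | solution
-- ===== SOURCE A (Python) =====
-- def solution(data):
--     total = 0
--     for i in data:
--         total += i
--     cnt = 0
--     average = total // len(data)
--     for i in data:
--         if i <= average:
--             cnt+=1
--     return cnt
-- ===== SOURCE B (Python) =====
-- import bisect
--
-- def solution(data):
--     average = sum(data) // len(data)
--     return bisect.bisect_right(sorted(data), average)
-- ===== Notes on version B (the rewrite author's own statement) =====
-- stated objective: alternative
-- what changed: Replaces A's manual summing loop and second linear scan-and-count with sum(), sorted() and a single bisect_right binary search that returns the number of elements <= the average directly.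
import Mathlib
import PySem

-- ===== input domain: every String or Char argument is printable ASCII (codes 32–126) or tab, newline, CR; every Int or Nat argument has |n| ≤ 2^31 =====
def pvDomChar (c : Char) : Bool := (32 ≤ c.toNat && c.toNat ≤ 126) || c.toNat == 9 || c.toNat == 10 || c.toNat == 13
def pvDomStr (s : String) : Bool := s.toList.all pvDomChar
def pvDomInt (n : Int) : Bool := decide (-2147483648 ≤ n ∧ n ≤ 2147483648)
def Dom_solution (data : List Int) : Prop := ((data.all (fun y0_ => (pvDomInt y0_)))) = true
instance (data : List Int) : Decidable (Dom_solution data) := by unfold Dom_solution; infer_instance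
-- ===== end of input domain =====

-- B replaces A's second counting scan with sorted + bisect_right (alternative decomposition, not claimed faster).

-- ===== PORT A =====
def solution (data : List Int) : Int :=
  let total := data.foldl (fun t i => t + i) 0
  let average := PySem.Int.floordiv total (data.length : Int)
  data.foldl (fun c i => if i ≤ average then c + 1 else c) 0

-- ===== PORT B =====
def solution_alt (data : List Int) : Int :=
  let average := PySem.Int.floordiv data.sum (data.length : Int)
  ((PySem.List.bisectRight (PySem.List.sorted data (fun x => x) false) average : Nat) : Int)

-- ===== PRECONDITION & SPEC =====
-- Pre_ excludes only the empty list, on which A raises ZeroDivisionError.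
def Pre_solution (data : List Int) : Prop := data ≠ []
instance (data : List Int) : Decidable (Pre_solution data) := by unfold Pre_solution; infer_instance
def pvWitness_solution : List Int := ([1, 2, 3])

def Spec_solution (data : List Int) (out : Int) : Prop := out = solution_alt data
instance (data : List Int) (out : Int) : Decidable (Spec_solution data out) := by unfold Spec_solution; infer_instance

-- ===== CLAIM (what is proved, stated in full; the proofs are below) =====
def Claim_equal_solution : Prop := ∀ (data : List Int), Dom_solution data → Pre_solution data → Spec_solution data (solution data)

-- ===== LEMMAS AND PROOFS =====

theorem pv_foldl_sum (l : List Int) (c : Int) :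
    l.foldl (fun t i => t + i) c = c + l.sum := by
  induction l generalizing c with
  | nil => simp
  | cons a t ih => simp [List.foldl, ih, List.sum_cons]; ring

theorem pv_foldl_count (p : Int → Bool) (l : List Int) (c : Int) :
    l.foldl (fun c i => if p i then c + 1 else c) c = c + (l.countP p : Int) := by
  induction l generalizing c with
  | nil => simp
  | cons a t ih =>
    by_cases h : p a
    · simp [List.foldl, h, ih]; ring
    · simp [List.foldl, h, ih]

theorem pv_countP_of_split (p : Int → Bool) (l : List Int) (k : Nat)
    (hk : k ≤ l.length)
    (h1 : ∀ (j : Nat) (hj : j < l.length), j < k → p l[j])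
    (h2 : ∀ (j : Nat) (hj : j < l.length), k ≤ j → ¬ p l[j]) :
    l.countP p = k := by
  induction l generalizing k with
  | nil => simp_all
  | cons a t ih =>
    cases k with
    | zero =>
      rw [List.countP_eq_zero.mpr]
      intro x hx
      obtain ⟨j, hj, rfl⟩ := List.mem_iff_getElem.mp hx
      exact h2 j hj (Nat.zero_le _)
    | succ m =>
      have hpa : p a := h1 0 (by simp) (Nat.succ_pos m)
      rw [List.countP_cons, if_pos hpa]
      have : t.countP p = m := by
        apply ih m (by simpa using Nat.succ_le_succ_iff.mp hk)
        · intro j hj hjm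
          have := h1 (j+1) (by simpa using Nat.succ_lt_succ hj) (Nat.succ_lt_succ hjm)
          simpa using this
        · intro j hj hmj
          have := h2 (j+1) (by simpa using Nat.succ_lt_succ hj) (Nat.succ_le_succ hmj)
          simpa using this
      omega

-- ===== VERDICT (by name: the statement is the Claim_ definition above) =====
theorem solution_spec : Claim_equal_solution := by
  intro data _ _
  unfold Spec_solution solution solution_alt
  have hsum : data.foldl (fun t i => t + i) 0 = data.sum := by
    simpa using pv_foldl_sum data 0
  rw [hsum]
  set avg := PySem.Int.floordiv data.sum (data.length : Int) with havg
  set s := PySem.List.sorted data (fun x => x) false with hs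
  have hpair : s.Pairwise (fun a b => a ≤ b) := by
    simpa using PySem.List.sorted_pairwise (xs := data) (key := fun x => x)
  obtain ⟨hb1, hb2, hb3⟩ := PySem.List.bisectRight_spec s avg hpair
  have hcs : s.countP (fun i => decide (i ≤ avg)) = PySem.List.bisectRight s avg := by
    apply pv_countP_of_split _ _ _ hb1
    · intro j hj hjk
      simpa using hb2 j hj hjk
    · intro j hj hkj
      simpa using Int.not_le.mpr (hb3 j hj hkj)
  have hperm : s.Perm data := PySem.List.sorted_perm data (fun x => x) false
  have hcd : data.countP (fun i => decide (i ≤ avg)) = PySem.List.bisectRight s avg := by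
    rw [← hperm.countP_eq]; exact hcs
  have hfold := pv_foldl_count (fun i => decide (i ≤ avg)) data 0
  simp only [decide_eq_true_eq] at hfold
  rw [hfold, hcd]
  simp
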